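-- pv_equiv track=rewrite | github.com/horno/protein-folding | folder.py | cardinalize
-- ===== SOURCE A (Python) =====
-- def cardinalize(protein):
--     cardinals = []
--     cardinals.append((0,0))
--     cardinals.append((0,0))
--     for i in range(2, len(protein)):
--         orientation = protein[i-1][1]
--         if orientation == 'N':
--             new_cards = (cardinals[i-1][0],cardinals[i-1][1]+1)
--         elif orientation == 'S':
--             new_cards = (cardinals[i-1][0],cardinals[i-1][1]-1)
--         elif orientation == 'E':
--             new_cards = (cardinals[i-1][0]+1,cardinals[i-1][1])
--         else:
--             new_cards = (cardinals[i-1][0]-1,cardinals[i-1][1])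
--         cardinals.append(new_cards)
--     return cardinals
-- ===== SOURCE B (Python) =====
-- def cardinalize(protein):
--     os = [o for _, o in protein[1:len(protein) - 1]]
--     coords = []
--     for k in range(len(os) + 1):
--         pre = os[:k]
--         x = pre.count('E') - sum(1 for c in pre if c not in ('N', 'S', 'E'))
--         y = pre.count('N') - pre.count('S')
--         coords.append((x, y))
--     return [(0, 0)] + coords
-- ===== Notes on version B (the rewrite author's own statement) =====
-- stated objective: alternative
-- what changed: Replaces A's cumulative single-pass (each coordinate built from the previous entry of the list being constructed) with a per-position closed form: coordinate k is computed independently as (count of 'E' minus count of non-NSE, count of 'N' minus count of 'S') over the orientation prefix os[:k], trading the running accumulator for direction counting.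
import Mathlib
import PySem

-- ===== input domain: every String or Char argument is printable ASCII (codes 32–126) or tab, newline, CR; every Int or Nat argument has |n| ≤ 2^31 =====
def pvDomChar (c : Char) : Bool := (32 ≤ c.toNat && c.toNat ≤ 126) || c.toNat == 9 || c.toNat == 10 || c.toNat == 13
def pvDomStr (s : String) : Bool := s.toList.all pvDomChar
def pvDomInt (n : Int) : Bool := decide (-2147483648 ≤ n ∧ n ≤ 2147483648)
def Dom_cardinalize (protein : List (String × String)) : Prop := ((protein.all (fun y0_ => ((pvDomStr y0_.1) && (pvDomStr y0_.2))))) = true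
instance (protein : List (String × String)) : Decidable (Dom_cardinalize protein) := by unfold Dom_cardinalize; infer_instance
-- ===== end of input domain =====

-- B computes each coordinate independently as a closed form over its orientation prefix
-- (count of 'E' minus count of non-NSE, count of 'N' minus count of 'S') instead of A's
-- cumulative loop that reads the previous entry of the list it is building. Equal value everywhere; no speed claim.

-- ===== PORT A =====
-- loop body of A's for-loop (indices i-1 are always in range, so pyGetD's default is never used)
def pvStepA (protein : List (String × String)) (cardinals : List (Int × Int)) (i : Int) : List (Int × Int) :=
  let orientation := (PySem.List.pyGetD protein (i - 1) ("", "")).2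
  let prev := PySem.List.pyGetD cardinals (i - 1) (0, 0)
  let new_cards :=
    if orientation == "N" then (prev.1, prev.2 + 1)
    else if orientation == "S" then (prev.1, prev.2 - 1)
    else if orientation == "E" then (prev.1 + 1, prev.2)
    else (prev.1 - 1, prev.2)
  cardinals ++ [new_cards]

def cardinalize (protein : List (String × String)) : List (Int × Int) :=
  (PySem.List.pyRange 2 protein.length 1).foldl (pvStepA protein) [(0, 0), (0, 0)]

-- ===== PORT B =====
-- body of Source B's for-loop: the coordinate for index k, computed from the prefix os[:k] alone
-- (the 0/1 generator sum 'sum(1 for c in pre if c not in ...)' is List.countP, per PySem)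
def pvCoordB (os : List String) (k : Int) : Int × Int :=
  let pre := PySem.List.slice os none (some k)
  ((PySem.List.count pre "E" : Int) - (pre.countP (fun c => !(c == "N" || c == "S" || c == "E")) : Int),
   (PySem.List.count pre "N" : Int) - (PySem.List.count pre "S" : Int))

def cardinalize_alt (protein : List (String × String)) : List (Int × Int) :=
  let os := (PySem.List.slice protein (some 1) (some ((protein.length : Int) - 1))).map (fun p => p.2)
  (0, 0) :: (PySem.List.pyRange 0 ((os.length : Int) + 1) 1).map (pvCoordB os)

-- ===== PRECONDITION & SPEC =====
def Spec_cardinalize (protein : List (String × String)) (out : List (Int × Int)) : Prop := out = cardinalize_alt protein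
instance (protein : List (String × String)) (out : List (Int × Int)) : Decidable (Spec_cardinalize protein out) := by unfold Spec_cardinalize; infer_instance

-- ===== CLAIM (what is proved, stated in full; the proofs are below) =====
def Claim_equal_cardinalize : Prop := ∀ (protein : List (String × String)), Dom_cardinalize protein → Spec_cardinalize protein (cardinalize protein)

-- ===== LEMMAS AND PROOFS =====

def pvAdd (a d : Int × Int) : Int × Int := (a.1 + d.1, a.2 + d.2)

def pvVec (o : String) : Int × Int :=
  if o == "N" then (0, 1) else if o == "S" then (0, -1) else if o == "E" then (1, 0) else (-1, 0)

-- the closed form on a bare prefix list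
def pvC (pre : List String) : Int × Int :=
  ((pre.count "E" : Int) - (pre.countP (fun c => !(c == "N" || c == "S" || c == "E")) : Int),
   (pre.count "N" : Int) - (pre.count "S" : Int))

theorem pvScanl_ne_nil {α β : Type} (f : β → α → β) (i : β) (xs : List α) :
    List.scanl f i xs ≠ [] := by
  cases xs <;> simp [List.scanl_nil]

theorem pvScanl_append_singleton {α β : Type} (f : β → α → β) (i : β) (xs : List α) (x : α) :
    List.scanl f i (xs ++ [x])
      = List.scanl f i xs ++ [f ((List.scanl f i xs).getLast (pvScanl_ne_nil f i xs)) x] := by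
  induction xs generalizing i with
  | nil => simp [List.scanl_nil, List.scanl_cons]
  | cons a xs ih =>
      simp only [List.cons_append, List.scanl_cons]
      rw [ih (f i a)]
      simp [List.getLast_cons (pvScanl_ne_nil f (f i a) xs)]

theorem pvFoldA_eq (protein : List (String × String)) (m : Nat) (h2 : 2 ≤ m)
    (hm : m ≤ protein.length) :
    (PySem.List.pyRange 2 (m : Int) 1).foldl (pvStepA protein) [(0, 0), (0, 0)]
      = (0, 0) :: List.scanl pvAdd (0, 0) (((protein.drop 1).take (m - 2)).map (fun p => pvVec p.2)) := by
  induction m, h2 using Nat.le_induction with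
  | base =>
      rw [PySem.List.pyRange_one_eq_nil (by norm_num)]
      simp [List.scanl_nil]
  | succ m h2 ih =>
      have hm' : m ≤ protein.length := by omega
      have hd : m - 2 < (protein.drop 1).length := by simp; omega
      rw [show ((m + 1 : Nat) : Int) = (m : Int) + 1 by push_cast; ring,
          PySem.List.pyRange_one_succ_right (by exact_mod_cast by omega : (2:Int) ≤ (m:Int)),
          List.foldl_append, ih hm']
      have htake : (protein.drop 1).take (m + 1 - 2)
          = (protein.drop 1).take (m - 2) ++ [(protein.drop 1)[m - 2]'hd] := by
        rw [show m + 1 - 2 = (m - 2) + 1 by omega, List.take_add_one]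
        simp
      rw [htake, List.map_append, List.map_cons, List.map_nil, pvScanl_append_singleton]
      simp only [List.foldl_cons, List.foldl_nil, pvStepA]
      have h1 : ((m : Int) - 1) = (((m - 1 : Nat) : Int)) := by omega
      have hlen : (List.scanl pvAdd ((0 : Int), (0 : Int))
          (((protein.drop 1).take (m - 2)).map (fun p => pvVec p.2))).length = m - 1 := by
        rw [List.length_scanl]
        simp
        omega
      have hget : PySem.List.pyGetD protein ((m : Int) - 1) ("", "")
          = protein[m - 1]'(by omega) := by
        rw [h1, PySem.List.pyGetD_natCast]
        exact List.getD_eq_getElem _ _ (by omega)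
      have hgetc : PySem.List.pyGetD
          ((0, 0) :: List.scanl pvAdd (0, 0) (((protein.drop 1).take (m - 2)).map (fun p => pvVec p.2)))
          ((m : Int) - 1) (0, 0)
          = (List.scanl pvAdd (0, 0) (((protein.drop 1).take (m - 2)).map (fun p => pvVec p.2))).getLast
              (pvScanl_ne_nil _ _ _) := by
        rw [h1, PySem.List.pyGetD_natCast, show m - 1 = (m - 2) + 1 by omega,
            List.getD_cons_succ, List.getD_eq_getElem _ _ (by rw [hlen]; omega),
            List.getLast_eq_getElem]
        congr 1
        rw [hlen]
        omega
      rw [hget, hgetc]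
      simp only [List.cons_append]
      congr 2
      have hdrop : (protein.drop 1)[m - 2]'hd = protein[m - 1]'(by omega) := by
        rw [List.getElem_drop]
        congr 1
        omega
      rw [hdrop]
      simp only [pvVec, pvAdd]
      split_ifs <;> simp <;> ring

theorem pvC_nil : pvC [] = (0, 0) := by decide

theorem pvAdd_zero_left (x : Int × Int) : pvAdd (0, 0) x = x := by
  simp [pvAdd]

theorem pvC_cons (a : String) (pre : List String) :
    pvC (a :: pre) = pvAdd (pvVec a) (pvC pre) := by
  simp only [pvC, pvVec, pvAdd, List.count_cons, List.countP_cons]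
  by_cases h1 : a = "N" <;> by_cases h2 : a = "S" <;> by_cases h3 : a = "E" <;>
    simp [h1, h2, h3] <;> omega

-- the heart of the equivalence: a running prefix sum of unit vectors equals the
-- per-position count closed form on every prefix
theorem pvScan_eq_counts (os : List String) (init : Int × Int) :
    List.scanl pvAdd init (os.map pvVec)
      = (List.range (os.length + 1)).map (fun j => pvAdd init (pvC (os.take j))) := by
  induction os generalizing init with
  | nil =>
      simp [List.scanl_nil, pvC_nil, pvAdd]
  | cons a t ih =>
      simp only [List.map_cons, List.scanl_cons, List.length_cons]
      rw [List.range_succ_eq_map, List.map_cons, List.map_map, ih (pvAdd init (pvVec a))]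
      congr 1
      · simp [pvC_nil, pvAdd]
      · apply List.map_congr_left
        intro j _
        simp only [Function.comp_apply, List.take_succ_cons, pvC_cons, pvAdd]
        ring_nf

theorem pvCoordB_natCast (os : List String) (j : Nat) :
    pvCoordB os (j : Int) = pvC (os.take j) := by
  simp only [pvCoordB, pvC, PySem.List.slice_to_natCast, PySem.List.count_eq]

theorem pvRangeMap_eq (os : List String) :
    (PySem.List.pyRange 0 ((os.length : Int) + 1) 1).map (pvCoordB os)
      = (List.range (os.length + 1)).map (fun j => pvC (os.take j)) := by
  rw [PySem.List.pyRange_one, List.map_map]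
  have hn : (((os.length : Int) + 1 - 0).toNat) = os.length + 1 := by omega
  rw [hn]
  apply List.map_congr_left
  intro j _
  simp only [Function.comp, zero_add]
  exact pvCoordB_natCast os j

theorem pvSlice_eq (protein : List (String × String)) (h : 2 ≤ protein.length) :
    PySem.List.slice protein (some 1) (some ((protein.length : Int) - 1))
      = (protein.drop 1).take (protein.length - 2) := by
  have h1 : ((protein.length : Int) - 1) = (((protein.length - 1 : Nat) : Int)) := by omega
  rw [h1, show (1 : Int) = ((1 : Nat) : Int) by norm_num, PySem.List.slice_natCast]
  congr 1

theorem cardinalize_eq (protein : List (String × String)) :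
    cardinalize protein = cardinalize_alt protein := by
  by_cases h : 2 ≤ protein.length
  · unfold cardinalize cardinalize_alt
    rw [pvFoldA_eq protein protein.length h le_rfl, pvSlice_eq protein h]
    congr 1
    rw [pvRangeMap_eq]
    have h2 := pvScan_eq_counts (((protein.drop 1).take (protein.length - 2)).map (fun p => p.2)) (0, 0)
    rw [List.map_map] at h2
    simp only [Function.comp_def] at h2
    rw [h2]
    apply List.map_congr_left
    intro j _
    exact pvAdd_zero_left _
  · match protein, h with
    | [], _ => decide
    | [p], _ =>
        unfold cardinalize cardinalize_alt
        rw [PySem.List.pyRange_one_eq_nil (by norm_num)]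
        rw [show ((([p] : List (String × String)).length : Int) - 1) = ((0 : Nat) : Int) by norm_num,
            show (1 : Int) = ((1 : Nat) : Int) by norm_num, PySem.List.slice_natCast]
        simp [PySem.List.pyRange_one, pvCoordB, PySem.List.count_eq]
    | _ :: _ :: _, h => exact absurd (by simp) h

-- ===== VERDICT (by name: the statement is the Claim_ definition above) =====
theorem cardinalize_spec : Claim_equal_cardinalize := by
  intro protein _
  unfold Spec_cardinalize
  exact cardinalize_eq protein
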